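-- pv_equiv track=rewrite | github.com/arach/talkie | scripts/fix-light-mode.py | fix_foreground_colors
-- ===== SOURCE A (Python) =====
-- from typing import Dict, List, Tuple
--
-- SPECIAL_CASES = {
--     ".foregroundColor(.primary)": "Theme.current.foreground",
--     ".foregroundColor(.secondary)": "Theme.current.foregroundSecondary",
-- }
--
-- def fix_foreground_colors(content: str) -> Tuple[str, int]:
--     """Fix .foregroundColor(.primary/.secondary) patterns."""
--     changes = 0
--
--     for old, new in SPECIAL_CASES.items():
--         count = content.count(old)
--         if count > 0:
--             content = content.replace(old, f".foregroundColor({new})")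
--             changes += count
--
--     return content, changes
-- ===== SOURCE B (Python) =====
-- from typing import Tuple
--
-- _PRI = ".foregroundColor(.primary)"
-- _SEC = ".foregroundColor(.secondary)"
-- _PRI_NEW = ".foregroundColor(Theme.current.foreground)"
-- _SEC_NEW = ".foregroundColor(Theme.current.foregroundSecondary)"
--
-- def fix_foreground_colors(content: str) -> Tuple[str, int]:
--     """Fix .foregroundColor(.primary/.secondary) patterns (single scan)."""
--     out = []
--     changes = 0
--     i = 0
--     n = len(content)
--     while i < n:
--         if content.startswith(_PRI, i):
--             out.append(_PRI_NEW)
--             i += len(_PRI)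
--             changes += 1
--         elif content.startswith(_SEC, i):
--             out.append(_SEC_NEW)
--             i += len(_SEC)
--             changes += 1
--         else:
--             out.append(content[i])
--             i += 1
--     return "".join(out), changes
-- ===== Notes on version B (the rewrite author's own statement) =====
-- stated objective: alternative
-- what changed: One left-to-right scan that dispatches per position on which pattern matches and counts as it goes, instead of two sequential count-then-replace passes over the whole string (one per dict entry).
import Mathlib
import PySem

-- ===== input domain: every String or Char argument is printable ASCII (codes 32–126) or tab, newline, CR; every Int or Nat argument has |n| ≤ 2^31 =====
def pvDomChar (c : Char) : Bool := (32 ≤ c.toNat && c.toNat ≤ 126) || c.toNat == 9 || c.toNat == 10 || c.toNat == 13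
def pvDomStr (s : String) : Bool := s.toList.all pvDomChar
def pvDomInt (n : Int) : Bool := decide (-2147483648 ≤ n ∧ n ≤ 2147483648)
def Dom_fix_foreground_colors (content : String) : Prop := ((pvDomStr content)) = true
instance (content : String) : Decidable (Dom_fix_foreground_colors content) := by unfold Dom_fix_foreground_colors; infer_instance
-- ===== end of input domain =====

-- B replaces A's two sequential count-then-replace passes (one per dict entry) by a single
-- left-to-right scan that dispatches on which pattern matches at each position; same result, same O(n) cost.

-- ===== PORT A =====
def SPECIAL_CASES : List (String × String) :=
  [(".foregroundColor(.primary)", "Theme.current.foreground"),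
   (".foregroundColor(.secondary)", "Theme.current.foregroundSecondary")]

def fix_foreground_colors (content : String) : String × Int :=
  -- changes = 0; for old, new in SPECIAL_CASES.items(): count = content.count(old);
  --   if count > 0: content = content.replace(old, f".foregroundColor({new})"); changes += count
  let r := SPECIAL_CASES.foldl (fun (st : String × Int) (kv : String × String) =>
    let count := PySem.Str.count st.1 kv.1
    if count > 0 then
      (PySem.Str.replace st.1 kv.1 (".foregroundColor(" ++ kv.2 ++ ")"), st.2 + (count : Int))
    else st) (content, 0)
  (r.1, r.2)

-- ===== PORT B =====
def pvP : List Char := ".foregroundColor(.primary)".toList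
def pvRP : List Char := ".foregroundColor(Theme.current.foreground)".toList
def pvS : List Char := ".foregroundColor(.secondary)".toList
def pvRS : List Char := ".foregroundColor(Theme.current.foregroundSecondary)".toList

-- the while loop of Source B: state = (remaining suffix of the input); emits output and counts changes
def pvScan : List Char → List Char × Int
  | [] => ([], 0)
  | c :: t =>
    if h1 : pvP.isPrefixOf (c :: t) then
      let r := pvScan ((c :: t).drop pvP.length)
      (pvRP ++ r.1, r.2 + 1)
    else if _h2 : pvS.isPrefixOf (c :: t) then
      let r := pvScan ((c :: t).drop pvS.length)
      (pvRS ++ r.1, r.2 + 1)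
    else
      let r := pvScan t
      (c :: r.1, r.2)
termination_by cs => cs.length
decreasing_by
  · have h := List.IsPrefix.length_le (List.isPrefixOf_iff_prefix.mp h1)
    have hl : pvP.length = 26 := by decide
    rw [hl] at h
    simp only [List.length_drop, List.length_cons, hl]
    omega
  · have h := List.IsPrefix.length_le (List.isPrefixOf_iff_prefix.mp _h2)
    have hl : pvS.length = 28 := by decide
    rw [hl] at h
    simp only [List.length_drop, List.length_cons, hl]
    omega
  · simp only [List.length_cons]
    omega

def fix_foreground_colors_alt (content : String) : String × Int :=
  let r := pvScan content.toList
  (String.ofList r.1, r.2)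

-- ===== PRECONDITION & SPEC =====
def Spec_fix_foreground_colors (content : String) (out : String × Int) : Prop := out = fix_foreground_colors_alt content
instance (content : String) (out : String × Int) : Decidable (Spec_fix_foreground_colors content out) := by unfold Spec_fix_foreground_colors; infer_instance

-- ===== CLAIM (what is proved, stated in full; the proofs are below) =====
def Claim_equal_fix_foreground_colors : Prop := ∀ (content : String), Dom_fix_foreground_colors content → Spec_fix_foreground_colors content (fix_foreground_colors content)

-- ===== LEMMAS AND PROOFS =====

-- Fuel-style reference versions of Python's str.count / str.replace (leftmost, non-overlapping),
-- mirroring PySem.Chars.count.go / replace.go without the accumulator.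
def pvCgo (needle : List Char) : Nat → List Char → Nat
  | 0, _ => 0
  | _ + 1, [] => 0
  | fuel + 1, c :: t =>
    if needle.isPrefixOf (c :: t) then pvCgo needle fuel ((c :: t).drop needle.length) + 1
    else pvCgo needle fuel t

def pvRgo (needle rep : List Char) : Nat → List Char → List Char
  | 0, l => l
  | _ + 1, [] => []
  | fuel + 1, c :: t =>
    if needle.isPrefixOf (c :: t) then rep ++ pvRgo needle rep fuel ((c :: t).drop needle.length)
    else c :: pvRgo needle rep fuel t

def pvCnt (needle s : List Char) : Nat := pvCgo needle s.length s
def pvRep (needle rep s : List Char) : List Char := pvRgo needle rep s.length s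

theorem pvCgo_nil (needle : List Char) (f : Nat) : pvCgo needle f [] = 0 := by
  cases f <;> rfl

theorem pvRgo_nil (needle rep : List Char) (f : Nat) : pvRgo needle rep f [] = [] := by
  cases f <;> rfl

theorem pvCgo_fuel (needle : List Char) (hne : needle ≠ []) :
    ∀ f1 f2 s, s.length ≤ f1 → s.length ≤ f2 → pvCgo needle f1 s = pvCgo needle f2 s := by
  intro f1
  induction f1 with
  | zero =>
    intro f2 s h1 _
    have : s = [] := List.eq_nil_of_length_eq_zero (Nat.le_zero.mp h1)
    subst this
    rw [pvCgo_nil, pvCgo_nil]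
  | succ f1 ih =>
    intro f2 s h1 h2
    cases s with
    | nil => rw [pvCgo_nil, pvCgo_nil]
    | cons c t =>
      cases f2 with
      | zero => simp at h2
      | succ f2 =>
        have hn : 0 < needle.length := List.length_pos_of_ne_nil hne
        simp only [pvCgo]
        by_cases hp : needle.isPrefixOf (c :: t)
        · have hlen := List.IsPrefix.length_le (List.isPrefixOf_iff_prefix.mp hp)
          simp only [hp, if_true]
          have := ih f2 ((c :: t).drop needle.length)
            (by simp only [List.length_drop]; simp at h1 hlen ⊢; omega)
            (by simp only [List.length_drop]; simp at h2 hlen ⊢; omega)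
          omega
        · rw [Bool.not_eq_true] at hp
          simp only [hp, Bool.false_eq_true, if_false]
          exact ih f2 t (by simp at h1; omega) (by simp at h2; omega)

theorem pvRgo_fuel (needle rep : List Char) (hne : needle ≠ []) :
    ∀ f1 f2 s, s.length ≤ f1 → s.length ≤ f2 → pvRgo needle rep f1 s = pvRgo needle rep f2 s := by
  intro f1
  induction f1 with
  | zero =>
    intro f2 s h1 _
    have : s = [] := List.eq_nil_of_length_eq_zero (Nat.le_zero.mp h1)
    subst this
    rw [pvRgo_nil, pvRgo_nil]
  | succ f1 ih =>
    intro f2 s h1 h2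
    cases s with
    | nil => rw [pvRgo_nil, pvRgo_nil]
    | cons c t =>
      cases f2 with
      | zero => simp at h2
      | succ f2 =>
        have hn : 0 < needle.length := List.length_pos_of_ne_nil hne
        simp only [pvRgo]
        by_cases hp : needle.isPrefixOf (c :: t)
        · have hlen := List.IsPrefix.length_le (List.isPrefixOf_iff_prefix.mp hp)
          simp only [hp, if_true]
          rw [ih f2 ((c :: t).drop needle.length)
            (by simp only [List.length_drop]; simp at h1 hlen ⊢; omega)
            (by simp only [List.length_drop]; simp at h2 hlen ⊢; omega)]
        · rw [Bool.not_eq_true] at hp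
          simp only [hp, Bool.false_eq_true, if_false]
          rw [ih f2 t (by simp at h1; omega) (by simp at h2; omega)]

theorem pvCnt_pos (needle l : List Char) (hne : needle ≠ []) (h : needle <+: l) :
    pvCnt needle l = pvCnt needle (l.drop needle.length) + 1 := by
  cases l with
  | nil =>
    exact absurd (List.prefix_nil.mp h) hne
  | cons c t =>
    have hp : needle.isPrefixOf (c :: t) := List.isPrefixOf_iff_prefix.mpr h
    have hn : 0 < needle.length := List.length_pos_of_ne_nil hne
    have hlen := List.IsPrefix.length_le h
    show pvCgo needle (t.length + 1) (c :: t) = _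
    simp only [pvCgo, hp, if_true]
    have := pvCgo_fuel needle hne t.length ((c :: t).drop needle.length).length
      ((c :: t).drop needle.length)
      (by simp only [List.length_drop]; simp at hlen ⊢; omega) le_rfl
    rw [this]
    rfl

theorem pvCnt_neg (needle : List Char) (c : Char) (t : List Char)
    (h : ¬ needle <+: (c :: t)) : pvCnt needle (c :: t) = pvCnt needle t := by
  have hp : needle.isPrefixOf (c :: t) = false :=
    Bool.eq_false_iff.mpr (fun hc => h (List.isPrefixOf_iff_prefix.mp hc))
  show pvCgo needle (t.length + 1) (c :: t) = _
  simp only [pvCgo, hp, Bool.false_eq_true, if_false]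
  rfl

theorem pvRep_pos (needle rep l : List Char) (hne : needle ≠ []) (h : needle <+: l) :
    pvRep needle rep l = rep ++ pvRep needle rep (l.drop needle.length) := by
  cases l with
  | nil =>
    exact absurd (List.prefix_nil.mp h) hne
  | cons c t =>
    have hp : needle.isPrefixOf (c :: t) := List.isPrefixOf_iff_prefix.mpr h
    have hn : 0 < needle.length := List.length_pos_of_ne_nil hne
    have hlen := List.IsPrefix.length_le h
    show pvRgo needle rep (t.length + 1) (c :: t) = _
    simp only [pvRgo, hp, if_true]
    rw [pvRgo_fuel needle rep hne t.length ((c :: t).drop needle.length).length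
      ((c :: t).drop needle.length)
      (by simp only [List.length_drop]; simp at hlen ⊢; omega) le_rfl]
    rfl

theorem pvRep_neg (needle rep : List Char) (c : Char) (t : List Char)
    (h : ¬ needle <+: (c :: t)) : pvRep needle rep (c :: t) = c :: pvRep needle rep t := by
  have hp : needle.isPrefixOf (c :: t) = false :=
    Bool.eq_false_iff.mpr (fun hc => h (List.isPrefixOf_iff_prefix.mp hc))
  show pvRgo needle rep (t.length + 1) (c :: t) = _
  simp only [pvRgo, hp, Bool.false_eq_true, if_false]
  rfl

-- bridges to PySem.Chars.count / replace
theorem pvCount_go_eq (needle : List Char) :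
    ∀ fuel s acc, PySem.Chars.count.go needle fuel s acc = acc + pvCgo needle fuel s := by
  intro fuel
  induction fuel with
  | zero => intro s acc; cases s <;> simp [PySem.Chars.count.go, pvCgo]
  | succ fuel ih =>
    intro s acc
    cases s with
    | nil => simp [PySem.Chars.count.go, pvCgo]
    | cons c t =>
      simp only [PySem.Chars.count.go, pvCgo]
      by_cases hp : needle.isPrefixOf (c :: t)
      · simp only [hp, if_true, ih]
        omega
      · rw [Bool.not_eq_true] at hp
        simp only [hp, Bool.false_eq_true, if_false, ih]

theorem pvReplace_go_eq (old new : List Char) :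
    ∀ fuel s acc, PySem.Chars.replace.go old new fuel s acc = acc.reverse ++ pvRgo old new fuel s := by
  intro fuel
  induction fuel with
  | zero => intro s acc; cases s <;> simp [PySem.Chars.replace.go, pvRgo]
  | succ fuel ih =>
    intro s acc
    cases s with
    | nil => simp [PySem.Chars.replace.go, pvRgo]
    | cons c t =>
      simp only [PySem.Chars.replace.go, pvRgo]
      by_cases hp : old.isPrefixOf (c :: t)
      · simp only [hp, if_true, ih]
        simp
      · rw [Bool.not_eq_true] at hp
        simp only [hp, Bool.false_eq_true, if_false, ih]
        simp

theorem pvCount_eq (needle s : List Char) (hne : needle ≠ []) :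
    PySem.Chars.count s needle = pvCnt needle s := by
  have : needle.isEmpty = false := by simpa using hne
  simp [PySem.Chars.count, this, pvCount_go_eq, pvCnt]

theorem pvReplace_eq (old new s : List Char) (hne : old ≠ []) :
    PySem.Chars.replace s old new = pvRep old new s := by
  have : old.isEmpty = false := by simpa using hne
  simp [PySem.Chars.replace, this, pvReplace_go_eq, pvRep]

-- count = 0 → replace is the identity
theorem pvRgo_of_cgo_zero (needle rep : List Char) :
    ∀ fuel s, pvCgo needle fuel s = 0 → pvRgo needle rep fuel s = s := by
  intro fuel
  induction fuel with
  | zero => intro s _; rfl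
  | succ fuel ih =>
    intro s h
    cases s with
    | nil => rw [pvRgo_nil]
    | cons c t =>
      simp only [pvCgo] at h
      simp only [pvRgo]
      by_cases hp : needle.isPrefixOf (c :: t)
      · simp [hp] at h
      · rw [Bool.not_eq_true] at hp
        simp only [hp, Bool.false_eq_true, if_false] at h ⊢
        rw [ih t h]

theorem pvRep_of_cnt_zero (needle rep s : List Char) (h : pvCnt needle s = 0) :
    pvRep needle rep s = s :=
  pvRgo_of_cgo_zero needle rep s.length s h

-- "needle never matches inside r, nor overlapping r's end": no suffix of r is comparable to needle
def pvNOcc (r needle : List Char) : Prop :=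
  ∀ i, i < r.length → ¬ (r.drop i <+: needle) ∧ ¬ (needle <+: r.drop i)

theorem pvNOcc_not_prefix {r needle : List Char} (h : pvNOcc r needle) (hr : r ≠ [])
    (t : List Char) : ¬ needle <+: (r ++ t) := by
  intro hp
  have h0 := h 0 (List.length_pos_of_ne_nil hr)
  simp only [List.drop_zero] at h0
  rcases Nat.le_total needle.length r.length with hle | hle
  · exact h0.2 (List.prefix_of_prefix_length_le hp (List.prefix_append r t) hle)
  · exact h0.1 (List.prefix_of_prefix_length_le (List.prefix_append r t) hp hle)

theorem pvNOcc_tail {a : Char} {r needle : List Char} (h : pvNOcc (a :: r) needle) :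
    pvNOcc r needle := by
  intro i hi
  have := h (i + 1) (by simpa using Nat.succ_lt_succ hi)
  simpa using this

theorem pvRep_cnt_append_of_nocc (needle rep : List Char) (t : List Char) :
    ∀ r, pvNOcc r needle →
      pvRep needle rep (r ++ t) = r ++ pvRep needle rep t ∧
      pvCnt needle (r ++ t) = pvCnt needle t := by
  intro r
  induction r with
  | nil => intro _; simp
  | cons a r ih =>
    intro hN
    have hnp : ¬ needle <+: ((a :: r) ++ t) := pvNOcc_not_prefix hN (List.cons_ne_nil a r) t
    have hnp' : ¬ needle <+: (a :: (r ++ t)) := by simpa using hnp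
    obtain ⟨hrep, hcnt⟩ := ih (pvNOcc_tail hN)
    constructor
    · rw [List.cons_append, pvRep_neg needle rep a (r ++ t) hnp', hrep]
      rfl
    · rw [List.cons_append, pvCnt_neg needle a (r ++ t) hnp', hcnt]

-- decide facts about the concrete patterns
theorem pvPne : pvP ≠ [] := by decide
theorem pvSne : pvS ≠ [] := by decide
theorem pvNOcc_RP_S : pvNOcc pvRP pvS := by unfold pvNOcc; decide
theorem pvNOcc_S_P : pvNOcc pvS pvP := by unfold pvNOcc; decide
theorem pvTails_S_RP : ∀ t ∈ pvS.tails, t = [] ∨ ¬ t.isPrefixOf pvRP := by decide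

-- No nonempty suffix of pvS can become a prefix of the P-replaced string unless it already
-- was a prefix of the original: replacing pvP by pvRP never creates a pvS match.
theorem pvK : ∀ n u t, u.length ≤ n → t <:+ pvS → t ≠ [] → t <+: pvRep pvP pvRP u → t <+: u := by
  intro n
  induction n with
  | zero =>
    intro u t hu _ hne hp
    have : u = [] := List.eq_nil_of_length_eq_zero (Nat.le_zero.mp hu)
    subst this
    rw [show pvRep pvP pvRP [] = [] from rfl] at hp
    exact absurd (List.prefix_nil.mp hp) hne
  | succ n ih =>
    intro u t hu hs hne hp
    by_cases hP : pvP <+: u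
    · obtain ⟨v, rfl⟩ := hP
      rw [pvRep_pos pvP pvRP _ pvPne (List.prefix_append pvP v), List.drop_left] at hp
      have hlen : t.length ≤ pvRP.length := by
        have h1 := List.IsSuffix.length_le hs
        have h2 : pvS.length = 28 := by decide
        have h3 : pvRP.length = 42 := by decide
        omega
      have htRP : t <+: pvRP :=
        List.prefix_of_prefix_length_le hp (List.prefix_append pvRP _) hlen
      rcases pvTails_S_RP t ((List.mem_tails t pvS).mpr hs) with h | h
      · exact absurd h hne
      · exact absurd (List.isPrefixOf_iff_prefix.mpr htRP) h
    · cases u with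
      | nil =>
        rw [show pvRep pvP pvRP [] = [] from rfl] at hp
        exact absurd (List.prefix_nil.mp hp) hne
      | cons c v =>
        rw [pvRep_neg pvP pvRP c v hP] at hp
        cases t with
        | nil => exact absurd rfl hne
        | cons e t' =>
          obtain ⟨rfl, ht'⟩ := List.cons_prefix_cons.mp hp
          by_cases ht'e : t' = []
          · subst ht'e
            exact List.cons_prefix_cons.mpr ⟨rfl, List.nil_prefix⟩
          · have hs' : t' <:+ pvS := (List.suffix_cons e t').trans hs
            have : t' <+: v := ih v t' (by simp at hu; omega) hs' ht'e ht'
            exact List.cons_prefix_cons.mpr ⟨rfl, this⟩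

-- unfolding equations for pvScan
theorem pvScan_nil : pvScan [] = ([], 0) := by
  rw [pvScan]

theorem pvScan_P {cs : List Char} (h : pvP.isPrefixOf cs) :
    pvScan cs = (pvRP ++ (pvScan (cs.drop pvP.length)).1, (pvScan (cs.drop pvP.length)).2 + 1) := by
  cases cs with
  | nil => exact absurd h (by decide)
  | cons c t =>
    rw [pvScan]
    simp [h]

theorem pvScan_S {cs : List Char} (h1 : ¬ pvP.isPrefixOf cs) (h2 : pvS.isPrefixOf cs) :
    pvScan cs = (pvRS ++ (pvScan (cs.drop pvS.length)).1, (pvScan (cs.drop pvS.length)).2 + 1) := by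
  cases cs with
  | nil => exact absurd h2 (by decide)
  | cons c t =>
    rw [pvScan]
    simp [h1, h2]

theorem pvScan_cons {c : Char} {t : List Char} (h1 : ¬ pvP.isPrefixOf (c :: t))
    (h2 : ¬ pvS.isPrefixOf (c :: t)) :
    pvScan (c :: t) = (c :: (pvScan t).1, (pvScan t).2) := by
  rw [pvScan]
  simp [h1, h2]

-- main character-level equivalence: the single scan computes exactly
-- "replace P then replace S, changes = count P + count S (after the P pass)"
theorem pvMain : ∀ n cs, cs.length ≤ n →
    pvScan cs = (pvRep pvS pvRS (pvRep pvP pvRP cs),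
      ((pvCnt pvP cs : Int) + (pvCnt pvS (pvRep pvP pvRP cs) : Int))) := by
  intro n
  induction n with
  | zero =>
    intro cs h
    have : cs = [] := List.eq_nil_of_length_eq_zero (Nat.le_zero.mp h)
    subst this
    rw [pvScan_nil]
    rfl
  | succ n ih =>
    intro cs hlen
    by_cases h1 : pvP.isPrefixOf cs
    · have hpre : pvP <+: cs := List.isPrefixOf_iff_prefix.mp h1
      have hPl : pvP.length = 26 := by decide
      have hcl := List.IsPrefix.length_le hpre
      rw [pvScan_P h1, pvRep_pos pvP pvRP cs pvPne hpre, pvCnt_pos pvP cs pvPne hpre]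
      obtain ⟨hrep, hcnt⟩ :=
        pvRep_cnt_append_of_nocc pvS pvRS (pvRep pvP pvRP (cs.drop pvP.length)) pvRP pvNOcc_RP_S
      rw [hrep, hcnt, ih (cs.drop pvP.length) (by simp only [List.length_drop]; omega)]
      refine Prod.ext rfl ?_
      push_cast
      ring
    · by_cases h2 : pvS.isPrefixOf cs
      · have hpre : pvS <+: cs := List.isPrefixOf_iff_prefix.mp h2
        obtain ⟨u, rfl⟩ := hpre
        have hSl : pvS.length = 28 := by decide
        obtain ⟨hrepP, hcntP⟩ :=
          pvRep_cnt_append_of_nocc pvP pvRP u pvS pvNOcc_S_P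
        rw [pvScan_S h1 h2, List.drop_left, hrepP, hcntP,
          pvRep_pos pvS pvRS _ pvSne (List.prefix_append pvS _), List.drop_left,
          pvCnt_pos pvS _ pvSne (List.prefix_append pvS _), List.drop_left,
          ih u (by simp at hlen; omega)]
        refine Prod.ext rfl ?_
        push_cast
        ring
      · cases cs with
        | nil =>
          rw [pvScan_nil]
          rfl
        | cons c t =>
          have hnp : ¬ pvP <+: (c :: t) := fun h => h1 (List.isPrefixOf_iff_prefix.mpr h)
          have hns : ¬ pvS <+: (c :: t) := fun h => h2 (List.isPrefixOf_iff_prefix.mpr h)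
          have hrepP := pvRep_neg pvP pvRP c t hnp
          have hnsrep : ¬ pvS <+: (c :: pvRep pvP pvRP t) := by
            intro hc
            rw [← hrepP] at hc
            exact hns (pvK (c :: t).length (c :: t) pvS le_rfl (List.suffix_refl pvS) pvSne hc)
          rw [pvScan_cons h1 h2, hrepP, pvCnt_neg pvP c t hnp,
            pvRep_neg pvS pvRS c (pvRep pvP pvRP t) hnsrep,
            pvCnt_neg pvS c (pvRep pvP pvRP t) hnsrep,
            ih t (by simp at hlen; omega)]


-- string-level bridges (A's passes, per pattern)
theorem pvRepP_toList (s : String) :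
    (PySem.Str.replace s ".foregroundColor(.primary)"
      (".foregroundColor(" ++ "Theme.current.foreground" ++ ")")).toList
      = pvRep pvP pvRP s.toList := by
  rw [PySem.Str.toList_replace,
    show (".foregroundColor(" ++ "Theme.current.foreground" ++ ")" : String).toList = pvRP
      from by decide]
  exact pvReplace_eq pvP pvRP s.toList pvPne

theorem pvRepS_toList (s : String) :
    (PySem.Str.replace s ".foregroundColor(.secondary)"
      (".foregroundColor(" ++ "Theme.current.foregroundSecondary" ++ ")")).toList
      = pvRep pvS pvRS s.toList := by
  rw [PySem.Str.toList_replace,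
    show (".foregroundColor(" ++ "Theme.current.foregroundSecondary" ++ ")" : String).toList = pvRS
      from by decide]
  exact pvReplace_eq pvS pvRS s.toList pvSne

theorem pvCountP_eq (s : String) :
    PySem.Str.count s ".foregroundColor(.primary)" = pvCnt pvP s.toList := by
  rw [PySem.Str.count_eq]
  exact pvCount_eq pvP s.toList pvPne

theorem pvCountS_eq (s : String) :
    PySem.Str.count s ".foregroundColor(.secondary)" = pvCnt pvS s.toList := by
  rw [PySem.Str.count_eq]
  exact pvCount_eq pvS s.toList pvSne

-- ===== VERDICT (by name: the statement is the Claim_ definition above) =====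
theorem fix_foreground_colors_spec : Claim_equal_fix_foreground_colors := by
  intro content _
  unfold Spec_fix_foreground_colors fix_foreground_colors fix_foreground_colors_alt SPECIAL_CASES
  simp only [List.foldl_cons, List.foldl_nil]
  by_cases h1 : PySem.Str.count content ".foregroundColor(.primary)" > 0
  · simp only [h1, if_true]
    by_cases h2 : PySem.Str.count (PySem.Str.replace content ".foregroundColor(.primary)"
        (".foregroundColor(" ++ "Theme.current.foreground" ++ ")"))
        ".foregroundColor(.secondary)" > 0
    · simp only [h2, if_true]
      rw [pvMain content.toList.length content.toList le_rfl]
      refine Prod.ext ?_ ?_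
      · have h := pvRepS_toList (PySem.Str.replace content ".foregroundColor(.primary)"
          (".foregroundColor(" ++ "Theme.current.foreground" ++ ")"))
        rw [pvRepP_toList] at h
        dsimp only
        rw [← h, String.ofList_toList]
      · dsimp only
        rw [pvCountP_eq, pvCountS_eq, pvRepP_toList]
        ring
    · simp only [h2, if_false]
      have hz : pvCnt pvS (pvRep pvP pvRP content.toList) = 0 := by
        have h := pvCountS_eq (PySem.Str.replace content ".foregroundColor(.primary)"
          (".foregroundColor(" ++ "Theme.current.foreground" ++ ")"))
        rw [pvRepP_toList] at h
        omega
      rw [pvMain content.toList.length content.toList le_rfl]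
      refine Prod.ext ?_ ?_
      · dsimp only
        rw [pvRep_of_cnt_zero pvS pvRS _ hz, ← pvRepP_toList content, String.ofList_toList]
      · dsimp only
        rw [pvCountP_eq, hz]
        push_cast
        ring
  · simp only [h1, if_false]
    have hz1 : pvCnt pvP content.toList = 0 := by
      have h := pvCountP_eq content
      omega
    have hrepP : pvRep pvP pvRP content.toList = content.toList :=
      pvRep_of_cnt_zero pvP pvRP content.toList hz1
    by_cases h2 : PySem.Str.count content ".foregroundColor(.secondary)" > 0
    · simp only [h2, if_true]
      rw [pvMain content.toList.length content.toList le_rfl]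
      refine Prod.ext ?_ ?_
      · dsimp only
        rw [hrepP, ← pvRepS_toList content, String.ofList_toList]
      · dsimp only
        rw [hrepP, hz1, pvCountS_eq]
        push_cast
        ring
    · simp only [h2, if_false]
      have hz2 : pvCnt pvS content.toList = 0 := by
        have h := pvCountS_eq content
        omega
      rw [pvMain content.toList.length content.toList le_rfl]
      refine Prod.ext ?_ ?_
      · dsimp only
        rw [hrepP, pvRep_of_cnt_zero pvS pvRS _ hz2, String.ofList_toList]
      · dsimp only
        rw [hrepP, hz1, hz2]
        norm_num
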